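-- pv_equiv track=rewrite | github.com/ExpLife0011/wk15-18 | gitlab/idfa_udp/idfa/idfa_udp_server/utils.py | byte_add
-- ===== SOURCE A (Python) =====
-- def byte_add(x):
--     rem = x%65536
--     quo = int(x/65536)
--     sum  = rem+quo
--     if sum < 65536:
--         return sum
--     else:
--         return byte_add(sum)
-- ===== SOURCE B (Python) =====
-- def byte_add(x):
--     s = x % 65536 + int(x / 65536)
--     while s >= 65536:
--         s = s % 65536 + int(s / 65536)
--     return s
-- ===== Notes on version B (the rewrite author's own statement) =====
-- stated objective: alternative
-- what changed: The tail recursion is rewritten as an explicit iterative while-loop over the running sum: the first folding step is hoisted out, the loop keeps folding while the sum is >= 65536, and the termination test is inverted; the arithmetic (x % 65536 plus truncating int(x/65536)) is unchanged.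
import Mathlib
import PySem

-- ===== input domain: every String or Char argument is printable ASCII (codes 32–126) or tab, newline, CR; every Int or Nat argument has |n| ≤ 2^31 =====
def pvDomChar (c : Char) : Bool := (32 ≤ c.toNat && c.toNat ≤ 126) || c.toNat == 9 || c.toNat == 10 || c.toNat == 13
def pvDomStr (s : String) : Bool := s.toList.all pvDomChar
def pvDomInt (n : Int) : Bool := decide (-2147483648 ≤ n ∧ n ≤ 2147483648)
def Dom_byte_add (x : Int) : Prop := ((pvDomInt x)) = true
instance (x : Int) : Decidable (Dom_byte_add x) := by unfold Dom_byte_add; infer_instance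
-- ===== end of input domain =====

-- B rewrites A's tail recursion as an explicit iterative loop over the running
-- sum (first folding step hoisted, termination test inverted); same arithmetic.


-- ===== PORT A =====
-- termination helper for both ports: when another folding step is taken, the argument shrinks
theorem byte_add_step_lt (x : Int)
    (h : ¬ PySem.Int.mod x 65536 + PySem.Int.truncdiv x 65536 < 65536) :
    (PySem.Int.mod x 65536 + PySem.Int.truncdiv x 65536).toNat < x.toNat := by
  have hr0 : 0 ≤ PySem.Int.mod x 65536 := PySem.Int.mod_nonneg x (by omega)
  have hr1 : PySem.Int.mod x 65536 < 65536 := PySem.Int.mod_lt x (by omega)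
  by_cases hx : 0 ≤ x
  · have hq : PySem.Int.truncdiv x 65536 = x / 65536 := by
      unfold PySem.Int.truncdiv; exact Int.tdiv_eq_ediv_of_nonneg hx
    have hm : PySem.Int.mod x 65536 = x % 65536 :=
      PySem.Int.mod_eq_emod_of_pos (by omega)
    rw [hq, hm] at h ⊢
    omega
  · exfalso
    have hq : PySem.Int.truncdiv x 65536 ≤ 0 := by
      unfold PySem.Int.truncdiv
      have h1 : (0 : Int) ≤ (-x).tdiv 65536 := Int.tdiv_nonneg (by omega) (by omega)
      have h2 : (-x).tdiv 65536 = -(x.tdiv 65536) := Int.neg_tdiv x 65536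
      omega
    omega

-- int(x/65536) is ported as PySem.Int.truncdiv, exact here since |x| ≤ 2^31 < 2^53 on Dom
def byte_add (x : Int) : Int :=
  let rem := PySem.Int.mod x 65536
  let quo := PySem.Int.truncdiv x 65536
  let sum := rem + quo
  if sum < 65536 then sum else byte_add sum
termination_by x.toNat
decreasing_by exact byte_add_step_lt x (by assumption)

-- ===== PORT B =====
-- termination for the loop: a folded value of s ≥ 65536 is strictly smaller
theorem byteAddLoop_step_lt (s : Int) (h : 65536 ≤ s) :
    (PySem.Int.mod s 65536 + PySem.Int.truncdiv s 65536).toNat < s.toNat := by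
  have hm : PySem.Int.mod s 65536 = s % 65536 :=
    PySem.Int.mod_eq_emod_of_pos (by omega)
  have hq : PySem.Int.truncdiv s 65536 = s / 65536 := by
    unfold PySem.Int.truncdiv; exact Int.tdiv_eq_ediv_of_nonneg (by omega)
  have hdm := Int.ediv_add_emod s 65536
  have h0 : 0 ≤ s % 65536 := Int.emod_nonneg s (by omega)
  have h1 : s % 65536 < 65536 := Int.emod_lt_of_pos s (by omega)
  rw [hm, hq]
  omega

-- the while-loop of Source B: keep folding s while s >= 65536
def byteAddLoop (s : Int) : Int :=
  if 65536 ≤ s then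
    byteAddLoop (PySem.Int.mod s 65536 + PySem.Int.truncdiv s 65536)
  else s
termination_by s.toNat
decreasing_by exact byteAddLoop_step_lt s (by assumption)

def byte_add_alt (x : Int) : Int :=
  byteAddLoop (PySem.Int.mod x 65536 + PySem.Int.truncdiv x 65536)

-- ===== PRECONDITION & SPEC =====
def Spec_byte_add (x : Int) (out : Int) : Prop := out = byte_add_alt x
instance (x : Int) (out : Int) : Decidable (Spec_byte_add x out) := by unfold Spec_byte_add; infer_instance

-- ===== CLAIM (what is proved, stated in full; the proofs are below) =====
def Claim_equal_byte_add : Prop := ∀ (x : Int), Dom_byte_add x → Spec_byte_add x (byte_add x)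

-- ===== LEMMAS AND PROOFS =====

theorem byte_add_eq (x : Int) :
    byte_add x =
      if PySem.Int.mod x 65536 + PySem.Int.truncdiv x 65536 < 65536 then
        PySem.Int.mod x 65536 + PySem.Int.truncdiv x 65536
      else byte_add (PySem.Int.mod x 65536 + PySem.Int.truncdiv x 65536) := by
  rw [byte_add]

-- A's recursion and B's loop compute the same value
theorem byte_add_eq_loop (x : Int) :
    byte_add x = byteAddLoop (PySem.Int.mod x 65536 + PySem.Int.truncdiv x 65536) := by
  rw [byte_add_eq]
  by_cases h : PySem.Int.mod x 65536 + PySem.Int.truncdiv x 65536 < 65536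
  · rw [if_pos h, byteAddLoop, if_neg (by omega)]
  · have hlt := byte_add_step_lt x h
    rw [if_neg h, byteAddLoop, if_pos (by omega)]
    exact byte_add_eq_loop (PySem.Int.mod x 65536 + PySem.Int.truncdiv x 65536)
termination_by x.toNat
decreasing_by exact hlt

-- ===== VERDICT (by name: the statement is the Claim_ definition above) =====
theorem byte_add_spec : Claim_equal_byte_add := by
  intro x _
  unfold Spec_byte_add byte_add_alt
  exact byte_add_eq_loop x
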